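-- pv_equiv track=rewrite | github.com/alexRyan719/python | Decipher_Student_Messages.py | decipher_message
-- ===== SOURCE A (Python) =====
-- def decipher_message(message):
--     import math
--     decoded_message = ""
--
--     width = int(math.pow(len(message),.5))
--     height = int(math.pow(len(message),.5))
--     x = 0
--     y = 0
--     index = 0
--
--     # Initialize a 2D array as Matrix.
--     Matrix = [[0 for x in range(width)] for y in range(height)]
--
--     # Populate Matrix with input message.
--     while y < height:
--         while x < width:
--             Matrix[x][y] = message[index]
--             x += 1
--             index += 1
--         x = 0
--         y += 1
--
--     x = 0
--     y = 0
--
--     # Build decoded message by traversing Matrix vertically.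
--     while x < width:
--         while y < height:
--             decoded_message += Matrix[x][y]
--             y += 1
--             index += 1
--         y = 0
--         x += 1
--
--
--
--     return decoded_message
-- ===== SOURCE B (Python) =====
-- def decipher_message(message):
--     import math
--     s = int(math.pow(len(message), .5))
--     # column x of the row-major s*s grid is just the stepped slice message[x : s*s : s]
--     return ''.join(message[x:s * s:s] for x in range(s))
-- ===== Notes on version B (the rewrite author's own statement) =====
-- stated objective: faster
-- what changed: Replaces the explicit 2D matrix fill and cell-by-cell re-read (four nested interpreted while-loops plus repeated string +=) by reading each grid column directly as one stepped slice message[x:s*s:s] and joining them, doing the per-character work in C-level slicing.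
import Mathlib
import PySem

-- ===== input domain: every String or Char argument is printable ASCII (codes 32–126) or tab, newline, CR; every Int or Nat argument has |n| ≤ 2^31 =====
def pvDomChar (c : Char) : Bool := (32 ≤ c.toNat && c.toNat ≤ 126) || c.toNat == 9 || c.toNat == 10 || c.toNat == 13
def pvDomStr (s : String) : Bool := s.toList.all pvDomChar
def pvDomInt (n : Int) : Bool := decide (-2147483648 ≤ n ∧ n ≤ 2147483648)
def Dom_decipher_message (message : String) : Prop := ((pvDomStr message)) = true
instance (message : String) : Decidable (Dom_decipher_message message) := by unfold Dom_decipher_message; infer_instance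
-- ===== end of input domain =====

-- B reads each grid column as a stepped slice message[x:s*s:s] instead of filling and
-- re-reading an explicit 2D matrix character by character; objective: faster (measured).
-- int(math.pow(n, .5)) is ported as Nat.sqrt: exact for all feasible string lengths (n < 2^52).

-- ===== PORT A =====
-- inner fill loop: while x < width: Matrix[x][y] = message[index]; x += 1; index += 1
def pvFillX (msg : List Char) (M : List (List Char)) (w y : Nat) (x idx : Nat) :
    List (List Char) × Nat :=
  if x < w then
    pvFillX msg (M.set x ((M.getD x []).set y (msg.getD idx ' '))) w y (x + 1) (idx + 1)
  else (M, idx)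
termination_by w - x

-- outer fill loop: while y < height: (inner loop); x = 0; y += 1
def pvFillY (msg : List Char) (M : List (List Char)) (w h : Nat) (y idx : Nat) :
    List (List Char) :=
  if y < h then
    let p := pvFillX msg M w y 0 idx
    pvFillY msg p.1 w h (y + 1) p.2
  else M
termination_by h - y

-- inner read loop: while y < height: decoded_message += Matrix[x][y]; y += 1
-- (the dead `index += 1` in this loop is unused state and is not carried)
def pvReadY (M : List (List Char)) (h x : Nat) (y : Nat) (acc : List Char) : List Char :=
  if y < h then pvReadY M h x (y + 1) (acc ++ [(M.getD x []).getD y ' ']) else acc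
termination_by h - y

-- outer read loop: while x < width: (inner loop); y = 0; x += 1
def pvReadX (M : List (List Char)) (w h : Nat) (x : Nat) (acc : List Char) : List Char :=
  if x < w then pvReadX M w h (x + 1) (pvReadY M h x 0 acc) else acc
termination_by w - x

def decipher_message (message : String) : String :=
  let msg := message.toList
  let w := Nat.sqrt msg.length      -- width  = int(math.pow(len(message), .5))
  let h := Nat.sqrt msg.length      -- height = int(math.pow(len(message), .5))
  -- Matrix = [[0]*width]*height; its cells are all overwritten before being read,
  -- so the (char-typed) initial filler ' ' is never observable
  let M0 := List.replicate h (List.replicate w ' ')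
  let M := pvFillY msg M0 w h 0 0
  String.mk (pvReadX M w h 0 [])

-- ===== PORT B =====
-- hand port (with a default char, never used in range) of the stepped slice xs[i:stop:step];
-- exact for 0 < step and nonnegative bounds, which is how Source B uses it
def pvStepCol (xs : List Char) (i stop step : Nat) : List Char :=
  if i < stop ∧ i < xs.length ∧ 0 < step then
    xs.getD i ' ' :: pvStepCol xs (i + step) stop step
  else []
termination_by stop - i

def decipher_message_alt (message : String) : String :=
  let xs := message.toList
  let s := Nat.sqrt xs.length
  String.mk (((List.range s).map (fun x => pvStepCol xs x (s * s) s)).flatten)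

-- ===== PRECONDITION & SPEC =====
def Spec_decipher_message (message : String) (out : String) : Prop := out = decipher_message_alt message
instance (message : String) (out : String) : Decidable (Spec_decipher_message message out) := by unfold Spec_decipher_message; infer_instance

-- ===== CLAIM (what is proved, stated in full; the proofs are below) =====
def Claim_equal_decipher_message : Prop := ∀ (message : String), Dom_decipher_message message → Spec_decipher_message message (decipher_message message)

-- ===== LEMMAS AND PROOFS =====

theorem pv_getD_set (M : List (List Char)) (x : Nat) (r : List Char) (a : Nat) :
    (M.set x r).getD a [] = if x = a ∧ x < M.length then r else M.getD a [] := by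
  simp only [List.getD, List.getElem?_set]
  by_cases h1 : x = a
  · subst h1
    by_cases h2 : x < M.length
    · simp [h2]
    · simp [h2, List.getElem?_eq_none (by omega : M.length ≤ x)]
  · simp [h1]

theorem pv_getD_set_char (r : List Char) (y : Nat) (c : Char) (b : Nat) :
    (r.set y c).getD b ' ' = if y = b ∧ y < r.length then c else r.getD b ' ' := by
  simp only [List.getD, List.getElem?_set]
  by_cases h1 : y = b
  · subst h1
    by_cases h2 : y < r.length
    · simp [h2]
    · simp [h2, List.getElem?_eq_none (by omega : r.length ≤ y)]
  · simp [h1]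

theorem pvFillX_len (msg : List Char) (M : List (List Char)) (w y x idx : Nat) :
    (pvFillX msg M w y x idx).1.length = M.length := by
  fun_induction pvFillX msg M w y x idx with
  | case1 M x idx h ih => simpa using ih
  | case2 => rfl

theorem pvFillX_rows (msg : List Char) (M : List (List Char)) (w y x idx : Nat)
    (H : ∀ a, a < w → ((M.getD a []).length = w)) :
    ∀ a, a < w → (((pvFillX msg M w y x idx).1.getD a []).length = w) := by
  fun_induction pvFillX msg M w y x idx with
  | case1 M x idx h ih =>
      apply ih
      intro a ha
      rw [pv_getD_set]
      split_ifs with hc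
      · rw [List.length_set]; exact H _ h
      · exact H a ha
  | case2 => exact H

theorem pvFillX_snd (msg : List Char) (M : List (List Char)) (w y x idx : Nat) (hx : x ≤ w) :
    (pvFillX msg M w y x idx).2 = idx + (w - x) := by
  fun_induction pvFillX msg M w y x idx with
  | case1 M x idx h ih => rw [ih (by omega)]; omega
  | case2 M x idx h => simp; omega

theorem pvFillX_getD (msg : List Char) (M : List (List Char)) (w y x idx : Nat)
    (hwM : w ≤ M.length) (Hrow : ∀ a, a < w → y < (M.getD a []).length) :
    ∀ a b, (((pvFillX msg M w y x idx).1.getD a []).getD b ' ') =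
      if x ≤ a ∧ a < w ∧ b = y then msg.getD (idx + (a - x)) ' '
      else ((M.getD a []).getD b ' ') := by
  fun_induction pvFillX msg M w y x idx with
  | case1 M x idx h ih =>
      intro a b
      have hxM : x < M.length := by omega
      have hlen : ∀ a', a' < w →
          y < ((M.set x ((M.getD x []).set y (msg.getD idx ' '))).getD a' []).length := by
        intro a' ha'
        rw [pv_getD_set]
        split_ifs with hc
        · rw [List.length_set]; exact Hrow x h
        · exact Hrow a' ha'
      rw [ih (by simpa using hwM) hlen a b, pv_getD_set]
      by_cases hax : x = a
      · subst hax
        rw [if_neg (show ¬(x + 1 ≤ x ∧ x < w ∧ b = y) by omega)]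
        rw [if_pos (show (x = x ∧ x < M.length) from ⟨rfl, hxM⟩)]
        rw [pv_getD_set_char]
        have hy := Hrow x h
        by_cases hby : y = b
        · subst hby
          rw [if_pos (show (y = y ∧ y < (M.getD x []).length) from ⟨rfl, hy⟩)]
          rw [if_pos (show (x ≤ x ∧ x < w ∧ y = y) from ⟨le_refl x, h, rfl⟩)]
          simp
        · rw [if_neg (show ¬(y = b ∧ y < (M.getD x []).length) from fun hc => hby hc.1)]
          rw [if_neg (show ¬(x ≤ x ∧ x < w ∧ b = y) from fun hc => hby hc.2.2.symm)]
      · rw [if_neg (show ¬(x = a ∧ x < M.length) from fun hc => hax hc.1)]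
        by_cases hC2 : x ≤ a ∧ a < w ∧ b = y
        · rw [if_pos hC2]
          rw [if_pos (show (x + 1 ≤ a ∧ a < w ∧ b = y) from ⟨by omega, hC2.2.1, hC2.2.2⟩)]
          congr 1
          omega
        · rw [if_neg hC2]
          rw [if_neg (show ¬(x + 1 ≤ a ∧ a < w ∧ b = y) from
            fun hc => hC2 ⟨Nat.le_of_succ_le hc.1, hc.2.1, hc.2.2⟩)]
  | case2 M x idx h =>
      intro a b
      split_ifs with h1 <;> [omega; rfl]

theorem pvFillY_getD (msg : List Char) (s : Nat) :
    ∀ y M idx, M.length = s → (∀ a, a < s → (M.getD a []).length = s) →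
    ∀ a b, a < s → b < s →
    (((pvFillY msg M s s y idx).getD a []).getD b ' ') =
      if y ≤ b then msg.getD (idx + (b - y) * s + a) ' '
      else ((M.getD a []).getD b ' ') := by
  intro y
  induction' hk : s - y with k ih generalizing y
  case zero =>
    intro M idx _ _ a b _ hb
    rw [pvFillY, if_neg (by omega)]
    rw [if_neg (by omega)]
  case succ =>
    intro M idx hM Hrow a b ha hb
    have hy : y < s := by omega
    rw [pvFillY, if_pos hy]
    simp only
    rw [pvFillX_snd msg M s y 0 idx (by omega)]
    have hM' : (pvFillX msg M s y 0 idx).1.length = s := by rw [pvFillX_len, hM]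
    have Hrow' := pvFillX_rows msg M s y 0 idx Hrow
    have ihr := ih (y + 1) (by omega) (pvFillX msg M s y 0 idx).1 (idx + (s - 0)) hM' Hrow'
      a b ha hb
    rw [ihr]
    have hcell := pvFillX_getD msg M s y 0 idx (by omega)
      (fun a' ha' => by rw [Hrow a' ha']; omega) a b
    by_cases hby : b = y
    · subst hby
      rw [if_neg (by omega), hcell, if_pos ⟨Nat.zero_le _, ha, rfl⟩]
      rw [if_pos (le_refl _)]
      simp
    · by_cases hyb : y + 1 ≤ b
      · rw [if_pos hyb, if_pos (by omega)]
        have hby' : b - y = (b - (y + 1)) + 1 := by omega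
        rw [hby', Nat.succ_mul]
        congr 1
        omega
      · rw [if_neg hyb, if_neg (by omega), hcell, if_neg (by omega)]

theorem pvReadY_eq (M : List (List Char)) (h x : Nat) :
    ∀ y acc, pvReadY M h x y acc =
      acc ++ (List.range (h - y)).map (fun k => (M.getD x []).getD (y + k) ' ') := by
  intro y
  induction' hk : h - y with k ih generalizing y
  case zero =>
    intro acc
    rw [pvReadY, if_neg (by omega)]
    simp
  case succ =>
    intro acc
    rw [pvReadY, if_pos (by omega)]
    rw [ih (y + 1) (by omega)]
    rw [List.range_succ_eq_map]
    simp [List.map_map, Function.comp_def, Nat.add_assoc, Nat.add_comm 1]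

theorem pvReadX_eq (M : List (List Char)) (w h : Nat) :
    ∀ x acc, pvReadX M w h x acc =
      acc ++ ((List.range (w - x)).map
        (fun k => (List.range h).map (fun y => (M.getD (x + k) []).getD y ' '))).flatten := by
  intro x
  induction' hk : w - x with k ih generalizing x
  case zero =>
    intro acc
    rw [pvReadX, if_neg (by omega)]
    simp
  case succ =>
    intro acc
    rw [pvReadX, if_pos (by omega)]
    rw [ih (x + 1) (by omega)]
    rw [pvReadY_eq]
    have h0 : h - 0 = h := by omega
    rw [h0]
    rw [List.range_succ_eq_map]
    simp [List.map_map, Function.comp_def, List.append_assoc, Nat.add_assoc, Nat.add_comm 1]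

theorem pvStepCol_eq (xs : List Char) (s x : Nat) (hx : x < s) (hss : s * s ≤ xs.length) :
    ∀ k j, j + k = s → pvStepCol xs (j * s + x) (s * s) s =
      (List.range k).map (fun y => xs.getD ((j + y) * s + x) ' ') := by
  intro k
  induction k with
  | zero =>
      intro j hj
      rw [pvStepCol, if_neg]
      · rfl
      · push_neg
        intro hlt
        exfalso
        have : j = s := by omega
        subst this
        nlinarith
  | succ k ih =>
      intro j hj
      have hjs : j < s := by omega
      have hi : j * s + x < s * s := by nlinarith
      rw [pvStepCol, if_pos ⟨hi, by omega, by omega⟩]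
      have harg : j * s + x + s = (j + 1) * s + x := by ring
      rw [harg, ih (j + 1) (by omega)]
      rw [List.range_succ_eq_map]
      simp only [List.map_cons, List.map_map, Function.comp_def, Nat.succ_eq_add_one]
      congr 1
      apply List.map_congr_left
      intro a _
      have hja : j + 1 + a = j + (a + 1) := by omega
      rw [hja]

-- ===== VERDICT (by name: the statement is the Claim_ definition above) =====
theorem decipher_message_spec : Claim_equal_decipher_message := by
  unfold Claim_equal_decipher_message Spec_decipher_message
  intro message _
  unfold decipher_message decipher_message_alt
  simp only
  set xs := message.toList with hxs
  set s := Nat.sqrt xs.length with hs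
  have hss : s * s ≤ xs.length := by simpa [pow_two] using Nat.sqrt_le' xs.length
  congr 1
  rw [pvReadX_eq]
  simp only [List.nil_append, Nat.sub_zero, Nat.zero_add]
  have hM0len : (List.replicate s (List.replicate s ' ')).length = s := by simp
  have hM0row : ∀ a, a < s → ((List.replicate s (List.replicate s ' ')).getD a []).length = s := by
    intro a ha
    simp [List.getD, ha]
  congr 1
  apply List.map_congr_left
  intro x hx
  have hxlt : x < s := List.mem_range.mp hx
  have hB := pvStepCol_eq xs s x hxlt hss s 0 (by omega)
  simp only [Nat.zero_mul, Nat.zero_add] at hB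
  rw [hB]
  apply List.map_congr_left
  intro y hy
  have hylt : y < s := List.mem_range.mp hy
  rw [pvFillY_getD xs s 0 _ 0 hM0len hM0row x y hxlt hylt]
  simp
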